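-- pv_equiv track=rewrite | github.com/JLT-inki/Advent_of_Code_2023 | day11/solver.py | get_all_galaxy_positions
-- ===== SOURCE A (Python) =====
-- def get_all_galaxy_positions(image: list[str], rows_expanded: list[int],
--                              colums_expanded: list[int], expansion_factor: int
--                              ) -> list[tuple[int, int]]:
--     galaxy_positions: list[tuple[int, int]] = []
--
--     for row in range(len(image)):
--         for column in range(len(image[0])):
--             if image[row][column] == "#":
--                 expansion_factor_row: int = -1
--                 expansion_factor_column: int = -1
--
--                 for count, expanded_row in enumerate(rows_expanded):
--                     if expanded_row > row:
--                         expansion_factor_row = count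
--                         break
--
--                 for count, expanded_column in enumerate(colums_expanded):
--                     if expanded_column > column:
--                         expansion_factor_column = count
--                         break
--
--                 if expansion_factor_column == -1:
--                     expansion_factor_column = len(colums_expanded)
--                 if expansion_factor_row == -1:
--                     expansion_factor_row = len(rows_expanded)
--
--                 galaxy_positions.append((
--                     row + expansion_factor_row * expansion_factor,
--                     column + expansion_factor_column * expansion_factor))
--
--     return galaxy_positions
-- ===== SOURCE B (Python) =====
-- def get_all_galaxy_positions(image: list[str], rows_expanded: list[int],
--                              colums_expanded: list[int], expansion_factor: int
--                              ) -> list[tuple[int, int]]: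
--     if not image:
--         return []
--     width = len(image[0])
--
--     def offset_table(lst, n):
--         # table[v] = index of the first element of lst greater than v, or len(lst)
--         table = [len(lst)] * n
--         nxt = 0  # smallest v not yet assigned; assigned v's are exactly those below every prefix maximum
--         for i, x in enumerate(lst):
--             while nxt < n and nxt < x:
--                 table[nxt] = i
--                 nxt += 1
--         return table
--
--     row_tab = offset_table(rows_expanded, len(image))
--     col_tab = offset_table(colums_expanded, width)
--
--     out: list[tuple[int, int]] = []
--     for r, line in enumerate(image):
--         for c in range(width):
--             if line[c] == "#":
--                 out.append((r + row_tab[r] * expansion_factor,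
--                             c + col_tab[c] * expansion_factor))
--     return out
-- ===== Notes on version B (the rewrite author's own statement) =====
-- stated objective: alternative
-- what changed: Instead of re-scanning the expansion lists for every galaxy, B fills one offset table per row index and per column index in a single left-to-right pass and emits each galaxy with two O(1) table lookups.
import Mathlib
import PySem

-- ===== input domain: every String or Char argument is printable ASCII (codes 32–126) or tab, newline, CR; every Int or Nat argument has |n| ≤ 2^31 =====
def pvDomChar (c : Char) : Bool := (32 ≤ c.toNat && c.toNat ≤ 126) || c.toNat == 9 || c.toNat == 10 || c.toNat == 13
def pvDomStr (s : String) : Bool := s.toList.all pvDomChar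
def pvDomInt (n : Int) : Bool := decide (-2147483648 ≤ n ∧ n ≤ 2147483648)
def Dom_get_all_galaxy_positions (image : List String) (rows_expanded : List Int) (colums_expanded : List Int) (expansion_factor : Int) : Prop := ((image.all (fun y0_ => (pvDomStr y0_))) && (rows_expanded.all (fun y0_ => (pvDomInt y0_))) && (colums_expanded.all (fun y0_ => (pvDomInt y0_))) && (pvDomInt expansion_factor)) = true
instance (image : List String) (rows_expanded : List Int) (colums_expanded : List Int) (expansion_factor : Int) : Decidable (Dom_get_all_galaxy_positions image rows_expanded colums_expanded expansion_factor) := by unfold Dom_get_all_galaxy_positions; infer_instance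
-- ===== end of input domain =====

-- B replaces A's per-galaxy linear scan of the expansion lists by offset tables filled once in
-- one left-to-right pass, then an O(1) lookup per cell (objective: alternative algorithm).

-- ===== PORT A =====
-- A's enumerate-with-break loop: returns the counter at the first element > v, else the sentinel -1
def pvFindGt : List Int → Int → Int → Int
  | [], _, _ => -1
  | x :: xs, v, cnt => if x > v then cnt else pvFindGt xs v (cnt + 1)

def get_all_galaxy_positions (image : List String) (rows_expanded : List Int) (colums_expanded : List Int) (expansion_factor : Int) : List (Int × Int) :=
  (List.range image.length).foldl (fun acc row =>
    (List.range (image.headD "").toList.length).foldl (fun acc2 col =>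
      if (image.getD row "").toList.getD col ' ' = '#' then
        let er0 : Int := pvFindGt rows_expanded (row : Int) 0
        let ec0 : Int := pvFindGt colums_expanded (col : Int) 0
        let ec : Int := if ec0 = -1 then (colums_expanded.length : Int) else ec0
        let er : Int := if er0 = -1 then (rows_expanded.length : Int) else er0
        acc2 ++ [((row : Int) + er * expansion_factor, (col : Int) + ec * expansion_factor)]
      else acc2) acc) []

-- ===== PORT B =====
-- B's inner 'while nxt < n and nxt < x: table[nxt] = i; nxt += 1' loop
def pvFill (i : Nat) (x : Int) (n : Nat) (nxt : Nat) (F : List Nat) : Nat × List Nat :=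
  if h : nxt < n ∧ (nxt : Int) < x then pvFill i x n (nxt + 1) (F.set nxt i) else (nxt, F)
termination_by n - nxt
decreasing_by omega

-- B's offset_table: table[v] = index of the first element of lst greater than v, or lst.length
def pvOffsetTable (lst : List Int) (n : Nat) : List Nat :=
  ((PySem.List.enumerate lst 0).foldl
    (fun (st : Nat × List Nat) p => pvFill p.1.toNat p.2 n st.1 st.2)
    (0, List.replicate n lst.length)).2

def get_all_galaxy_positions_alt (image : List String) (rows_expanded : List Int) (colums_expanded : List Int) (expansion_factor : Int) : List (Int × Int) :=
  if image.isEmpty then [] else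
  let width := (image.headD "").toList.length
  let rowTab : List Nat := pvOffsetTable rows_expanded image.length
  let colTab : List Nat := pvOffsetTable colums_expanded width
  (PySem.List.enumerate image 0).foldl (fun acc p =>
    (List.range width).foldl (fun acc2 (c : Nat) =>
      if p.2.toList.getD c ' ' = '#' then
        acc2 ++ [(p.1 + (rowTab.getD p.1.toNat 0 : Int) * expansion_factor,
                  (c : Int) + (colTab.getD c 0 : Int) * expansion_factor)]
      else acc2) acc) []

-- ===== PRECONDITION & SPEC =====
-- Pre_ excludes ragged images (a row shorter than the first row), on which the Python A raises IndexError.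
def Pre_get_all_galaxy_positions (image : List String) (rows_expanded : List Int) (colums_expanded : List Int) (expansion_factor : Int) : Prop :=
  ∀ s ∈ image, (image.headD "").toList.length ≤ s.toList.length
instance (image : List String) (rows_expanded : List Int) (colums_expanded : List Int) (expansion_factor : Int) : Decidable (Pre_get_all_galaxy_positions image rows_expanded colums_expanded expansion_factor) := by unfold Pre_get_all_galaxy_positions; infer_instance
def pvWitness_get_all_galaxy_positions : List String × List Int × List Int × Int := (["#.", ".#"], [1], [1], 3)

def Spec_get_all_galaxy_positions (image : List String) (rows_expanded : List Int) (colums_expanded : List Int) (expansion_factor : Int) (out : List (Int × Int)) : Prop := out = get_all_galaxy_positions_alt image rows_expanded colums_expanded expansion_factor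
instance (image : List String) (rows_expanded : List Int) (colums_expanded : List Int) (expansion_factor : Int) (out : List (Int × Int)) : Decidable (Spec_get_all_galaxy_positions image rows_expanded colums_expanded expansion_factor out) := by unfold Spec_get_all_galaxy_positions; infer_instance

-- ===== CLAIM (what is proved, stated in full; the proofs are below) =====
def Claim_equal_get_all_galaxy_positions : Prop := ∀ (image : List String) (rows_expanded : List Int) (colums_expanded : List Int) (expansion_factor : Int), Dom_get_all_galaxy_positions image rows_expanded colums_expanded expansion_factor → Pre_get_all_galaxy_positions image rows_expanded colums_expanded expansion_factor → Spec_get_all_galaxy_positions image rows_expanded colums_expanded expansion_factor (get_all_galaxy_positions image rows_expanded colums_expanded expansion_factor)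

-- ===== LEMMAS AND PROOFS =====

-- proof-side characterisation: index of the first element > v, or the length
def pvFirstGt : List Int → Int → Nat
  | [], _ => 0
  | x :: xs, v => if x > v then 0 else pvFirstGt xs v + 1

theorem pvFindGt_eq (l : List Int) (v : Int) :
    ∀ i : Int, pvFindGt l v i = if pvFirstGt l v = l.length then -1 else i + pvFirstGt l v := by
  induction l with
  | nil => intro i; simp [pvFindGt, pvFirstGt]
  | cons x xs ih =>
    intro i
    by_cases h : x > v
    · simp [pvFindGt, pvFirstGt, h]
    · simp only [pvFindGt, pvFirstGt, if_neg h, ih (i + 1)]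
      by_cases h1 : pvFirstGt xs v = xs.length
      · simp [h1]
      · have h2 : ¬ (pvFirstGt xs v + 1 = (x :: xs).length) := by
          simp [List.length_cons]; omega
        simp only [if_neg h1, if_neg h2]
        push_cast; ring

theorem pvFix_eq (l : List Int) (v : Int) :
    (if pvFindGt l v 0 = -1 then (l.length : Int) else pvFindGt l v 0) = (pvFirstGt l v : Int) := by
  rw [pvFindGt_eq l v 0]
  by_cases h1 : pvFirstGt l v = l.length
  · simp [h1]
  · have h2 : (0 : Int) + (pvFirstGt l v : Int) ≠ -1 := by omega
    rw [if_neg h1, if_neg h2]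
    omega

theorem pvFill_length (i : Nat) (x : Int) (n : Nat) :
    ∀ (nxt : Nat) (F : List Nat), (pvFill i x n nxt F).2.length = F.length := by
  intro nxt F
  fun_induction pvFill i x n nxt F with
  | case1 nxt F h ih => rw [ih]; simp
  | case2 nxt F h => rfl

theorem pvFill_fst (i : Nat) (x : Int) (n : Nat) :
    ∀ (nxt : Nat) (F : List Nat), (pvFill i x n nxt F).1 = max nxt (min x.toNat n) := by
  intro nxt F
  fun_induction pvFill i x n nxt F with
  | case1 nxt F h ih => rw [ih]; omega
  | case2 nxt F h => simp only; omega

theorem pvFill_getD (i : Nat) (x : Int) (n : Nat) :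
    ∀ (nxt : Nat) (F : List Nat), n ≤ F.length → ∀ w < n,
      (pvFill i x n nxt F).2.getD w 0 =
        if nxt ≤ w ∧ (w : Int) < x then i else F.getD w 0 := by
  intro nxt F
  fun_induction pvFill i x n nxt F with
  | case1 nxt F h ih =>
    intro hF w hw
    rw [ih (by simpa using hF) w hw]
    by_cases hwn : w = nxt
    · subst hwn
      have : ¬ (w + 1 ≤ w ∧ (w : Int) < x) := by omega
      rw [if_neg this, if_pos ⟨le_refl w, h.2⟩]
      simp [List.getD, show w < F.length by omega]
    · by_cases hc : nxt + 1 ≤ w ∧ (w : Int) < x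
      · rw [if_pos hc, if_pos ⟨by omega, hc.2⟩]
      · have hc' : ¬ (nxt ≤ w ∧ (w : Int) < x) := by omega
        rw [if_neg hc, if_neg hc']
        simp only [List.getD, List.getElem?_set]
        rw [if_neg (fun hh => hwn hh.symm)]
  | case2 nxt F h =>
    intro hF w hw
    have : ¬ (nxt ≤ w ∧ (w : Int) < x) := by
      rcases not_and_or.mp h with h' | h'
      · intro ⟨h1, h2⟩; omega
      · intro ⟨h1, h2⟩
        have : x ≤ (nxt : Int) := by omega
        omega
    simp only [if_neg this]

theorem pvTable_aux (n : Nat) :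
    ∀ (lst : List Int) (s : Nat) (st : Nat × List Nat), st.2.length = n → ∀ v < n,
      (((PySem.List.enumerate lst (s : Int)).foldl
          (fun (st : Nat × List Nat) p => pvFill p.1.toNat p.2 n st.1 st.2) st).2).getD v 0 =
        if v < st.1 then st.2.getD v 0
        else if pvFirstGt lst (v : Int) = lst.length then st.2.getD v 0
        else s + pvFirstGt lst (v : Int) := by
  intro lst
  induction lst with
  | nil =>
    intro s st hst v hv
    simp [PySem.List.enumerate, pvFirstGt]
  | cons x xs ih =>
    intro s st hst v hv
    rw [PySem.List.enumerate_cons]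
    simp only [List.foldl_cons, Int.toNat_natCast]
    have hcast : ((s : Int) + 1) = ((s + 1 : Nat) : Int) := by push_cast; ring
    rw [hcast]
    have hlen : (pvFill s x n st.1 st.2).2.length = n := by rw [pvFill_length]; exact hst
    rw [ih (s + 1) (pvFill s x n st.1 st.2) hlen v hv]
    have hfst : (pvFill s x n st.1 st.2).1 = max st.1 (min x.toNat n) := pvFill_fst _ _ _ _ _
    have hgetD : (pvFill s x n st.1 st.2).2.getD v 0 =
        if st.1 ≤ v ∧ (v : Int) < x then s else st.2.getD v 0 :=
      pvFill_getD _ _ _ _ _ (by omega) v hv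
    by_cases hvx : (v : Int) < x
    · have hfg : pvFirstGt (x :: xs) (v : Int) = 0 := by
        simp [pvFirstGt, show x > (v : Int) from hvx]
      by_cases hvn : v < st.1
      · have hg2 : (pvFill s x n st.1 st.2).2.getD v 0 = st.2.getD v 0 := by
          rw [hgetD, if_neg (by omega)]
        rw [hfst, hg2, hfg]
        simp only [List.length_cons]
        split_ifs <;> omega
      · have hg2 : (pvFill s x n st.1 st.2).2.getD v 0 = s := by
          rw [hgetD, if_pos ⟨by omega, hvx⟩]
        rw [hfst, hg2, hfg]
        simp only [List.length_cons]
        split_ifs <;> first | omega | contradiction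
    · have hfg : pvFirstGt (x :: xs) (v : Int) = pvFirstGt xs (v : Int) + 1 := by
        simp [pvFirstGt, show ¬ x > (v : Int) from by omega]
      have hg2 : (pvFill s x n st.1 st.2).2.getD v 0 = st.2.getD v 0 := by
        rw [hgetD, if_neg (by omega)]
      rw [hfst, hg2, hfg]
      simp only [List.length_cons]
      split_ifs <;> omega

theorem pvOffsetTable_getD (lst : List Int) (n : Nat) (v : Nat) (hv : v < n) :
    (pvOffsetTable lst n).getD v 0 = pvFirstGt lst (v : Int) := by
  unfold pvOffsetTable
  have h := pvTable_aux n lst 0 (0, List.replicate n lst.length) (by simp) v hv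
  simp only [Nat.cast_zero] at h
  rw [h]
  rw [if_neg (by omega)]
  by_cases hfin : pvFirstGt lst (v : Int) = lst.length
  · rw [if_pos hfin]
    simp [List.getD, hv, hfin]
  · rw [if_neg hfin]; omega

theorem enum_eq_map_range (xs : List String) :
    ∀ s : Int, PySem.List.enumerate xs s =
      (List.range xs.length).map (fun r : Nat => ((s + r : Int), xs.getD r "")) := by
  induction xs with
  | nil => intro s; simp [PySem.List.enumerate]
  | cons x xs ih =>
    intro s
    rw [PySem.List.enumerate_cons, ih (s + 1)]
    simp [List.range_succ_eq_map, List.map_map, Function.comp_def]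
    intro a _
    ring

theorem get_all_galaxy_positions_eq (image : List String) (rows_expanded : List Int) (colums_expanded : List Int) (expansion_factor : Int) :
    get_all_galaxy_positions image rows_expanded colums_expanded expansion_factor =
      get_all_galaxy_positions_alt image rows_expanded colums_expanded expansion_factor := by
  unfold get_all_galaxy_positions get_all_galaxy_positions_alt
  cases himg : image with
  | nil => simp
  | cons hd tl =>
    rw [← himg]
    have hne : image.isEmpty = false := by rw [himg]; rfl
    rw [hne]
    simp only [Bool.false_eq_true, if_false]
    rw [enum_eq_map_range image 0, List.foldl_map]
    apply PySem.List.foldl_congr_mem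
    intro acc r hr
    have hrlt : r < image.length := List.mem_range.mp hr
    apply PySem.List.foldl_congr_mem
    intro acc2 c hc
    have hclt : c < (image.headD "").toList.length := List.mem_range.mp hc
    simp only [zero_add, Int.toNat_natCast]
    rw [pvOffsetTable_getD rows_expanded image.length r hrlt,
        pvOffsetTable_getD colums_expanded _ c hclt, pvFix_eq, pvFix_eq]

-- ===== VERDICT (by name: the statement is the Claim_ definition above) =====
theorem get_all_galaxy_positions_spec : Claim_equal_get_all_galaxy_positions := by
  intro image rows_expanded colums_expanded expansion_factor _ _
  unfold Spec_get_all_galaxy_positions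
  exact get_all_galaxy_positions_eq image rows_expanded colums_expanded expansion_factor
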